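-- pv_equiv track=rewrite | github.com/ishandutta2007/codeforces | somethingnew/normal/1367/D.py | anns
-- ===== SOURCE A (Python) =====
-- def anns(lst, lnum):
--     nm = 0
--     lg = 0
--     rg = 0
--     lstnum = [0 for i in range(len(lst))]
--     for i in range(1, len(lst)):
--         if lst[i] != -1:
--             nm += i
--             rg += 1
--     if lst[0] != -1:
--         lg += 1
--     lstnum[0] = nm
--     for i in range(1, len(lst)):
--         if lst[i] == -1:
--             lstnum[i] = lstnum[i-1] + lg - rg
--         else:
--             lstnum[i] = lstnum[i-1] + lg - rg
--             lg += 1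
--             rg -= 1
--     ansk = []
--     for i in range(len(lst)):
--         if lstnum[i] == lnum[i]:
--             ansk.append(i)
--     return ansk
-- ===== SOURCE B (Python) =====
-- def anns(lst, lnum):
--     n = len(lst)
--     lstnum = []
--     for i in range(n):
--         s = 0
--         for j in range(n):
--             if lst[j] != -1:
--                 s += abs(i - j)
--         lstnum.append(s)
--     return [i for i in range(n) if lstnum[i] == lnum[i]]
-- ===== Notes on version B (the rewrite author's own statement) =====
-- stated objective: simpler
-- what changed: B drops A's incremental nm/lg/rg running-total bookkeeping and computes each lstnum[i] directly from its definition as the sum of abs(i-j) over positions j with lst[j] != -1, then filters the matching indices.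
import Mathlib
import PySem

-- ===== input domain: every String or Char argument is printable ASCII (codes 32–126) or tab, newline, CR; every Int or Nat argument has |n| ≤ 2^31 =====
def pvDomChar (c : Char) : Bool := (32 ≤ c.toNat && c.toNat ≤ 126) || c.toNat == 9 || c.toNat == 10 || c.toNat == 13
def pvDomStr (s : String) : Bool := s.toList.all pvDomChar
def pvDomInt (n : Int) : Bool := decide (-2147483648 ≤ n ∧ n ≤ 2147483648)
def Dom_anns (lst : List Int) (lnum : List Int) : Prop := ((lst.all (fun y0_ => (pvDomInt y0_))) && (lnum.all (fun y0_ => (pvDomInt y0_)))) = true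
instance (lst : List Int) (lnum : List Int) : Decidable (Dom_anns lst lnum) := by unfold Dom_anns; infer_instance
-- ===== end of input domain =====

-- B replaces A's single-pass running-total bookkeeping (nm/lg/rg) by computing each
-- lstnum[i] directly from its definition as the sum of |i-j| over positions j with
-- lst[j] != -1 (a plainer double loop; not faster than A).

-- ===== PORT A =====
def anns (lst : List Int) (lnum : List Int) : List Int :=
  let n : Int := lst.length
  let p1 := (PySem.List.pyRange 1 n 1).foldl
      (fun (p : Int × Int) i =>
        if PySem.List.pyGetD lst i 0 ≠ -1 then (p.1 + i, p.2 + 1) else p) (0, 0)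
  let lg : Int := if PySem.List.pyGetD lst 0 0 ≠ -1 then 1 else 0
  let st := (PySem.List.pyRange 1 n 1).foldl
      (fun (s : Int × Int × Int × List Int) i =>
        let cur := s.1 + s.2.1 - s.2.2.1
        if PySem.List.pyGetD lst i 0 = -1 then (cur, s.2.1, s.2.2.1, s.2.2.2 ++ [cur])
        else (cur, s.2.1 + 1, s.2.2.1 - 1, s.2.2.2 ++ [cur]))
      (p1.1, lg, p1.2, [p1.1])
  let lstnum := st.2.2.2
  (PySem.List.pyRange 0 n 1).foldl
    (fun acc i =>
      if PySem.List.pyGetD lstnum i 0 = PySem.List.pyGetD lnum i 0 then acc ++ [i] else acc) []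

def anns_alt (lst : List Int) (lnum : List Int) : List Int :=
  let n := lst.length
  let lstnum := (List.range n).map (fun i : Nat =>
    (List.range n).foldl
      (fun s j => if lst.getD j 0 ≠ -1 then s + |(i : Int) - (j : Int)| else s) 0)
  ((List.range n).filter (fun i : Nat => decide (lstnum.getD i 0 = lnum.getD i 0))).map
    (fun i : Nat => (i : Int))

-- ===== PRECONDITION & SPEC =====
-- Pre_ excludes exactly the inputs on which Python A raises IndexError:
-- the empty lst (A assigns lstnum[0] into an empty list) and lnum shorter than lst (A reads lnum[i]).
def Pre_anns (lst : List Int) (lnum : List Int) : Prop :=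
  lst ≠ [] ∧ lst.length ≤ lnum.length
instance (lst : List Int) (lnum : List Int) : Decidable (Pre_anns lst lnum) := by
  unfold Pre_anns; infer_instance

def pvWitness_anns : List Int × List Int := ([1, -1], [1, 0])

def Spec_anns (lst : List Int) (lnum : List Int) (out : List Int) : Prop := out = anns_alt lst lnum
instance (lst : List Int) (lnum : List Int) (out : List Int) : Decidable (Spec_anns lst lnum out) := by unfold Spec_anns; infer_instance

-- ===== CLAIM (what is proved, stated in full; the proofs are below) =====
def Claim_equal_anns : Prop := ∀ (lst : List Int) (lnum : List Int), Dom_anns lst lnum → Pre_anns lst lnum → Spec_anns lst lnum (anns lst lnum)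

-- ===== LEMMAS AND PROOFS =====

def pvS (lst : List Int) (i : Int) : Int :=
  ∑ j ∈ Finset.range lst.length, if lst.getD j 0 ≠ -1 then |i - (j : Int)| else 0
def pvC (lst : List Int) (m : Nat) : Int :=
  ∑ j ∈ Finset.range m, if lst.getD j 0 ≠ -1 then 1 else 0
lemma pvC_succ (lst : List Int) (m : Nat) :
    pvC lst (m + 1) = pvC lst m + (if lst.getD m 0 ≠ -1 then 1 else 0) :=
  Finset.sum_range_succ _ m
lemma abs_step (m j : Nat) :
    |((m : Int) + 1) - (j : Int)| = |(m : Int) - (j : Int)| + (if j ≤ m then 1 else -1) := by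
  rcases Nat.le_total j m with h | h
  · rw [if_pos h, abs_of_nonneg (by omega), abs_of_nonneg (by omega)]; omega
  · rcases Nat.eq_or_lt_of_le h with h' | h'
    · rw [h']; simp
    · rw [if_neg (by omega), abs_of_nonpos (by omega), abs_of_nonpos (by omega)]; omega

lemma key_S (lst : List Int) (m : Nat) (h : m + 1 ≤ lst.length) :
    pvS lst ((m : Int) + 1)
      = pvS lst m + pvC lst (m + 1) - (pvC lst lst.length - pvC lst (m + 1)) := by
  have hsplit : ∀ k : Nat, m + 1 ≤ k →
      (∑ j ∈ Finset.range k, if lst.getD j 0 ≠ -1 then (if j ≤ m then (1:Int) else -1) else 0)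
      = pvC lst (m+1) - (pvC lst k - pvC lst (m+1)) := by
    intro k hk
    induction k with
    | zero => omega
    | succ k ih =>
      rcases Nat.lt_or_ge m k with hmk | hmk
      · rw [Finset.sum_range_succ, ih (by omega), pvC_succ lst k]
        have hkm : ¬ k ≤ m := by omega
        simp only [hkm, if_false]
        split_ifs <;> ring
      · have hkm : k = m := by omega
        subst hkm
        have : (∑ j ∈ Finset.range (k+1), if lst.getD j 0 ≠ -1 then (if j ≤ k then (1:Int) else -1) else 0) = pvC lst (k+1) := by
          apply Finset.sum_congr rfl
          intro j hj
          have hjk : j ≤ k := by simp at hj; omega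
          simp only [hjk, if_true]
        rw [this]; ring
  have hpt : pvS lst ((m : Int) + 1)
      = pvS lst m + (∑ j ∈ Finset.range lst.length, if lst.getD j 0 ≠ -1 then (if j ≤ m then (1:Int) else -1) else 0) := by
    rw [pvS, pvS, ← Finset.sum_add_distrib]
    apply Finset.sum_congr rfl
    intro j _
    by_cases hj : lst.getD j 0 ≠ -1
    · simp only [if_pos hj, abs_step]
    · simp only [if_neg hj]; ring
  rw [hpt, hsplit lst.length h]
  ring

def pvNM (lst : List Int) (m : Nat) : Int :=
  ∑ j ∈ Finset.range (m+1), if lst.getD j 0 ≠ -1 then (j:Int) else 0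

lemma fold1_inv (lst : List Int) (m : Nat) :
    (PySem.List.pyRange 1 ((m:Int)+1) 1).foldl
      (fun (p : Int × Int) i =>
        if PySem.List.pyGetD lst i 0 ≠ -1 then (p.1 + i, p.2 + 1) else p) (0, 0)
    = (pvNM lst m, pvC lst (m+1) - pvC lst 1) := by
  induction m with
  | zero =>
    rw [show ((0:Nat):Int)+1 = 1 by ring, PySem.List.pyRange_one_eq_nil (by omega)]
    simp [pvNM]
  | succ m ih =>
    rw [show ((m+1:Nat):Int)+1 = ((m:Int)+1)+1 by push_cast; ring,
        PySem.List.pyRange_one_succ_right (by omega), List.foldl_append, ih]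
    simp only [List.foldl_cons, List.foldl_nil]
    rw [show ((m:Int)+1) = ((m+1:Nat):Int) by push_cast; ring, PySem.List.pyGetD_natCast]
    rw [pvC_succ lst (m+1), show pvNM lst (m+1) = pvNM lst m + (if lst.getD (m+1) 0 ≠ -1 then ((m+1:Nat):Int) else 0) from Finset.sum_range_succ _ (m+1)]
    split_ifs with hm
    · simp only [Prod.mk.injEq]; constructor <;> push_cast <;> ring
    · simp

lemma loop2_inv (lst : List Int) (m : Nat) (hm : m + 1 ≤ lst.length) :
    (PySem.List.pyRange 1 ((m:Int)+1) 1).foldl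
      (fun (s : Int × Int × Int × List Int) i =>
        let cur := s.1 + s.2.1 - s.2.2.1
        if PySem.List.pyGetD lst i 0 = -1 then (cur, s.2.1, s.2.2.1, s.2.2.2 ++ [cur])
        else (cur, s.2.1 + 1, s.2.2.1 - 1, s.2.2.2 ++ [cur]))
      (pvS lst 0, pvC lst 1, pvC lst lst.length - pvC lst 1, [pvS lst 0])
    = (pvS lst (m:Int), pvC lst (m+1), pvC lst lst.length - pvC lst (m+1),
       (List.range (m+1)).map (fun i : Nat => pvS lst (i:Int))) := by
  induction m with
  | zero =>
    rw [show ((0:Nat):Int)+1 = 1 by ring, PySem.List.pyRange_one_eq_nil (by omega)]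
    simp
  | succ m ih =>
    rw [show ((m+1:Nat):Int)+1 = ((m:Int)+1)+1 by push_cast; ring,
        PySem.List.pyRange_one_succ_right (by omega), List.foldl_append, ih (by omega)]
    simp only [List.foldl_cons, List.foldl_nil]
    rw [show ((m:Int)+1) = ((m+1:Nat):Int) by push_cast; ring, PySem.List.pyGetD_natCast]
    have hcur : pvS lst (m:Int) + pvC lst (m+1) - (pvC lst lst.length - pvC lst (m+1))
        = pvS lst ((m+1:Nat):Int) := by
      rw [show ((m+1:Nat):Int) = (m:Int)+1 by push_cast; ring, key_S lst m (by omega)]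
    have hrange : (List.range (m+1)).map (fun i : Nat => pvS lst (i:Int)) ++ [pvS lst ((m+1:Nat):Int)]
        = (List.range (m+1+1)).map (fun i : Nat => pvS lst (i:Int)) := by
      rw [List.range_succ (n := m+1), List.map_append]; simp
    rw [pvC_succ lst (m+1)]
    by_cases hm1 : lst.getD (m+1) 0 = -1
    · rw [if_pos hm1, if_neg (not_not_intro hm1)]
      simp only [Prod.mk.injEq]
      exact ⟨hcur, by ring, by ring, by rw [← hrange, hcur]⟩
    · rw [if_neg hm1, if_pos hm1]
      simp only [Prod.mk.injEq]
      exact ⟨hcur, by simp, by ring, by rw [← hrange, hcur]⟩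

lemma sum_map_range (n : Nat) (f : Nat → Int) :
    ((List.range n).map f).sum = ∑ j ∈ Finset.range n, f j := rfl

lemma inner_eq_pvS (lst : List Int) (i : Nat) :
    (List.range lst.length).foldl
      (fun s j => if lst.getD j 0 ≠ -1 then s + |(i : Int) - (j : Int)| else s) 0
    = pvS lst i := by
  have h : (fun (s : Int) (j : Nat) => if lst.getD j 0 ≠ -1 then s + |(i : Int) - (j : Int)| else s)
      = fun s j => s + (if lst.getD j 0 ≠ -1 then |(i : Int) - (j : Int)| else 0) := by
    funext s j; split <;> simp
  rw [h, PySem.List.foldl_add,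
      sum_map_range lst.length (fun j => if lst.getD j 0 ≠ -1 then |(i : Int) - (j : Int)| else 0)]
  simp [pvS]

lemma pvNM_eq_pvS0 (lst : List Int) : pvNM lst (lst.length - 1 + 1 - 1) = pvS lst 0 := by
  have : lst.length - 1 + 1 - 1 + 1 = lst.length - 1 + 1 := by omega
  rw [pvNM, this, pvS]
  rcases Nat.eq_zero_or_pos lst.length with h0 | h0
  · simp [h0]
  · rw [Nat.sub_add_cancel h0]
    apply Finset.sum_congr rfl
    intro j _
    have : |(0:Int) - (j:Int)| = (j:Int) := by
      rw [zero_sub, abs_neg, Int.abs_natCast]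
    rw [this]

lemma pvC_one (lst : List Int) : pvC lst 1 = if lst.getD 0 0 ≠ -1 then 1 else 0 := by
  rw [pvC]; exact Finset.sum_range_one (f := fun j => if lst.getD j 0 ≠ -1 then (1:Int) else 0)

lemma ports_eq (lst lnum : List Int) (h1 : lst ≠ []) : anns lst lnum = anns_alt lst lnum := by
  have hn : 1 ≤ lst.length := List.length_pos_iff.mpr h1
  have ecast : (↑lst.length : Int) = ((lst.length - 1 : Nat) : Int) + 1 := by
    rw [Nat.cast_sub hn]; push_cast; ring
  have esub : lst.length - 1 + 1 = lst.length := Nat.sub_add_cancel hn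
  simp only [anns, anns_alt]
  -- B's lstnum is the direct distance sums
  rw [List.map_congr_left (fun i _ => inner_eq_pvS lst i)]
  -- A's first loop
  rw [ecast, fold1_inv lst (lst.length - 1)]
  -- A's lg is pvC 1
  rw [PySem.List.pyGetD_zero, show (if lst.getD 0 0 ≠ -1 then (1:Int) else 0) = pvC lst 1 from (pvC_one lst).symm]
  -- normalize pvNM and pvC indices
  rw [show pvNM lst (lst.length - 1) = pvS lst 0 from by
        have := pvNM_eq_pvS0 lst; rwa [show lst.length - 1 + 1 - 1 = lst.length - 1 from by omega] at this,
      esub]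
  -- A's second loop
  rw [loop2_inv lst (lst.length - 1) (by omega)]
  rw [esub]
  -- A's third loop over pyRange 0 n
  rw [show ((lst.length - 1 : Nat) : Int) + 1 = ((lst.length : Nat) : Int) from by rw [ecast],
      PySem.List.pyRange_zero_natCast, List.foldl_map]
  simp only []
  have hshape : (fun (acc : List Int) (y : Nat) =>
        if PySem.List.pyGetD ((List.range lst.length).map (fun i : Nat => pvS lst (i:Int))) (y:Int) 0
             = PySem.List.pyGetD lnum (y:Int) 0 then acc ++ [(y:Int)] else acc)
      = (fun acc y =>
        if (fun y : Nat => decide (PySem.List.pyGetD ((List.range lst.length).map (fun i : Nat => pvS lst (i:Int))) (y:Int) 0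
             = PySem.List.pyGetD lnum (y:Int) 0)) y = true then acc ++ [(fun y : Nat => (y:Int)) y] else acc) := by
    funext acc y; simp
  rw [hshape, PySem.List.foldl_append_if, List.nil_append]
  have hcong : ∀ x ∈ List.range lst.length,
      (fun y : Nat => decide (PySem.List.pyGetD ((List.range lst.length).map (fun i : Nat => pvS lst (i:Int))) (y:Int) 0
             = PySem.List.pyGetD lnum (y:Int) 0)) x
      = (fun i : Nat => decide (((List.range lst.length).map (fun i : Nat => pvS lst (i:Int))).getD i 0 = lnum.getD i 0)) x := by
    intro x hx
    simp only [PySem.List.pyGetD_natCast]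
  rw [List.filter_congr hcong]

-- ===== VERDICT (by name: the statement is the Claim_ definition above) =====
theorem anns_spec : Claim_equal_anns := by
  intro lst lnum _ hpre
  exact ports_eq lst lnum hpre.1
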